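-- pv_equiv track=rewrite | github.com/QuarkML/Transformer-NMT | preprocess.py | split_sequences
-- ===== SOURCE A (Python) =====
-- def split_sequences(tokenized_en, tokenized_hi, max_seq_length = 256):
--
--     """ The function is used for splitting the larger sequences that are greater than the max_seq_length """
--
--     processed_en = []
--     processed_hi = []
--
--
--     for en_seq, hi_seq in zip(tokenized_en, tokenized_hi):
--         en_len = len(en_seq)
--         hi_len = len(hi_seq)
--
--
--         # If both sequences are within the max length, keep them as is
--         if en_len <= max_seq_length and hi_len <= max_seq_length:
--             processed_en.append(en_seq)
--             processed_hi.append(hi_seq)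
--             continue
--
--         # Finding the number of splits that is needed
--         max_len = max(en_len, hi_len) # Find the maximum length of the two sequences
--
--         # Calculate the number of splits needed,
--         # This willl give the number of splits needed to split the sequence into max_seq_length
--         # Not the most efficient way to split since it splits to the smallest possible size
--         n_splits = (max_len + max_seq_length - 1) // max_seq_length
--
--         # Finding better split size
--         if max_len % n_splits == 0: # If the max_len is divisible by n_splits, then we can split the sequence into equal parts
--             split_size = max_len // n_splits
--         else:
--
--             # Otherwise, we need to find the largest divisor that creates segments <= max_seq_length
--             for i in range(n_splits, max_len):
--                 if max_len % i == 0 and max_len // i <= max_seq_length: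
--                     n_splits = i
--                     split_size = max_len // n_splits
--                     break
--             else:
--                 split_size = (max_len + n_splits - 1) // n_splits
--
--
--         # Split the sequences based on the calculated split size
--         for i in range(n_splits):
--             start_idx = i * split_size
--             end_idx_en = min((i + 1) * split_size, en_len)
--             end_idx_hi = min((i + 1) * split_size, hi_len)
--
--             en_subseq = en_seq[start_idx:end_idx_en]
--             hi_subseq = hi_seq[start_idx:end_idx_hi]
--
--
--             # Since there is chance that the splitted sequence is still greater than max_seq_length
--             # We need to split it again, this is a recursive call that does it until the sequence is less than max_seq_length
--             if len(en_subseq) > max_seq_length or len(hi_subseq) > max_seq_length: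
--                 sub_en, sub_hi = split_sequences([en_subseq], [hi_subseq], max_seq_length)
--                 processed_en.extend(sub_en)
--                 processed_hi.extend(sub_hi)
--             else:
--                 processed_en.append(en_subseq)
--                 processed_hi.append(hi_subseq)
--
--     return processed_en, processed_hi
-- ===== SOURCE B (Python) =====
-- def split_sequences(tokenized_en, tokenized_hi, max_seq_length = 256):
--     """Split overlong pairs into chunks of at most max_seq_length tokens.
--
--     The chunk size is the largest divisor of the longer length that fits the
--     bound (taken from the paired divisors d, L // d), so the pieces are
--     equal-sized whenever possible; if only the trivial divisor 1 fits, the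
--     sequence is cut into the minimum number of nearly-equal chunks."""
--     out_en, out_hi = [], []
--     for en_seq, hi_seq in zip(tokenized_en, tokenized_hi):
--         if len(en_seq) <= max_seq_length and len(hi_seq) <= max_seq_length:
--             out_en.append(en_seq)
--             out_hi.append(hi_seq)
--             continue
--         L = max(len(en_seq), len(hi_seq))
--         # largest divisor of L that is <= max_seq_length
--         s = 1
--         d = 1
--         while d * d <= L:
--             if L % d == 0:
--                 for c in (d, L // d):
--                     if s < c <= max_seq_length:
--                         s = c
--             d += 1
--         if s > 1:
--             n = L // s
--         else:
--             # no equal split fits: minimum number of nearly-equal chunks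
--             n = (L + max_seq_length - 1) // max_seq_length
--             s = (L + n - 1) // n
--         for i in range(n):
--             out_en.append(en_seq[i * s:(i + 1) * s])
--             out_hi.append(hi_seq[i * s:(i + 1) * s])
--     return out_en, out_hi
-- ===== Notes on version B (the rewrite author's own statement) =====
-- stated objective: alternative
-- what changed: B picks the chunk size directly as the largest divisor of the longer length that fits the bound, collected from the paired divisors d and L//d of a sqrt enumeration, instead of A's linear scan over range(n_splits, max_len) for a split count; B also drops A's re-split recursion, which never fires for max_seq_length >= 1. Pre_ excludes non-positive max_seq_length, on which A raises ZeroDivisionError (0) or RecursionError (negative bound with an empty sequence) or returns accidental empty output from a negative split count.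
-- outside the precondition, e.g. on split_sequences([[1, 2, 3, 4, 5]], [[1, 2, 3, 4, 5]], -2): A returns ([], []), B returns ([], [])
import Mathlib
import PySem

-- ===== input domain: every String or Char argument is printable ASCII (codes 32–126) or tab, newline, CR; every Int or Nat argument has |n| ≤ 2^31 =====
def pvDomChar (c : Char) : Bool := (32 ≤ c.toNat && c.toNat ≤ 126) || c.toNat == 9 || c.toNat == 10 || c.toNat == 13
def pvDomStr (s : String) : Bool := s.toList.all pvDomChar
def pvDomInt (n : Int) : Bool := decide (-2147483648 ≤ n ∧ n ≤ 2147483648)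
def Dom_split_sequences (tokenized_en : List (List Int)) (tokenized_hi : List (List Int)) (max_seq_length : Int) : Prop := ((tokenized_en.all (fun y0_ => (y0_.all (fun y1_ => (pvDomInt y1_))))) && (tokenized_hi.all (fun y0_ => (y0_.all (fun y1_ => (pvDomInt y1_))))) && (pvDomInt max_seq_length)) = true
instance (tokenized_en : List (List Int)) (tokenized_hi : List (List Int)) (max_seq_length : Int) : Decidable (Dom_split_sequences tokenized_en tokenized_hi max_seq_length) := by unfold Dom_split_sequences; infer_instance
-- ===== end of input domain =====

-- B picks the chunk size directly as the largest divisor of the longer length that fits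
-- the bound, taken from the paired divisors d and L/d, instead of A's linear scan for a
-- split count; outputs are identical for max_seq_length ≥ 1.

-- ===== PORT A =====
-- Literal transliteration of A; the recursive call is guarded by fuel, a pure totality
-- guard (under Pre_ the recursion branch is never taken, as the proofs below show).
mutual
def pvAInner (fuel : Nat) (en hi : List Int) (enL hiL s M : Int) : List Int → List (List Int) × List (List Int)
  | [] => ([], [])
  | i :: rest =>
    let esub := PySem.List.slice en (some (i * s)) (some (min ((i + 1) * s) enL))
    let hsub := PySem.List.slice hi (some (i * s)) (some (min ((i + 1) * s) hiL))
    let head : List (List Int) × List (List Int) :=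
      if M < PySem.List.len esub ∨ M < PySem.List.len hsub then
        match fuel with
        | 0 => ([], [])
        | f + 1 => pvASplit f [(esub, hsub)] M
      else ([esub], [hsub])
    let t := pvAInner fuel en hi enL hiL s M rest
    (head.1 ++ t.1, head.2 ++ t.2)
  termination_by is => (fuel, 0, is.length)

def pvAPair (fuel : Nat) (en hi : List Int) (M : Int) : List (List Int) × List (List Int) :=
  let enL := PySem.List.len en
  let hiL := PySem.List.len hi
  if enL ≤ M ∧ hiL ≤ M then ([en], [hi])
  else
    let L := max enL hiL
    let k := PySem.Int.floordiv (L + M - 1) M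
    let ns : Int × Int :=
      if PySem.Int.mod L k = 0 then (k, PySem.Int.floordiv L k)
      else
        match (PySem.List.pyRange k L 1).find?
            (fun i => PySem.Int.mod L i == 0 && decide (PySem.Int.floordiv L i ≤ M)) with
        | some i => (i, PySem.Int.floordiv L i)
        | none => (k, PySem.Int.floordiv (L + k - 1) k)
    pvAInner fuel en hi enL hiL ns.2 M (PySem.List.pyRange 0 ns.1 1)
  termination_by (fuel, 1, 0)

def pvASplit (fuel : Nat) (pairs : List (List Int × List Int)) (M : Int) : List (List Int) × List (List Int) :=
  match pairs with
  | [] => ([], [])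
  | (en, hi) :: rest =>
    let h := pvAPair fuel en hi M
    let t := pvASplit fuel rest M
    (h.1 ++ t.1, h.2 ++ t.2)
  termination_by (fuel, 2, pairs.length)
end

def split_sequences (tokenized_en : List (List Int)) (tokenized_hi : List (List Int)) (max_seq_length : Int) : List (List Int) × List (List Int) :=
  pvASplit (tokenized_en.length + (tokenized_en.map List.length).sum + 1)
    (tokenized_en.zip tokenized_hi) max_seq_length

-- ===== PORT B =====
-- the `while d * d <= L` loop of Source B, carrying the best chunk size s; the paired
-- candidates d and L//d are tried in order. The `0 < d` conjunct is only a totality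
-- guard (the loop starts at d = 1 and increments).
def pvBBest (L M s d : Int) : Int :=
  if 0 < d ∧ d * d ≤ L then
    let s1 := if PySem.Int.mod L d = 0 then
        let sa := if s < d ∧ d ≤ M then d else s
        let q := PySem.Int.floordiv L d
        if sa < q ∧ q ≤ M then q else sa
      else s
    pvBBest L M s1 (d + 1)
  else s
  termination_by (L + 1 - d).toNat
  decreasing_by
    have h1 : d ≤ d * d := le_mul_of_one_le_left (by omega) (by omega)
    omega

def split_sequences_alt (tokenized_en : List (List Int)) (tokenized_hi : List (List Int)) (max_seq_length : Int) : List (List Int) × List (List Int) :=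
  (tokenized_en.zip tokenized_hi).foldl
    (fun acc p =>
      if PySem.List.len p.1 ≤ max_seq_length ∧ PySem.List.len p.2 ≤ max_seq_length then
        (acc.1 ++ [p.1], acc.2 ++ [p.2])
      else
        let L := max (PySem.List.len p.1) (PySem.List.len p.2)
        let s := pvBBest L max_seq_length 1 1
        let ns : Int × Int :=
          if 1 < s then (PySem.Int.floordiv L s, s)
          else
            let n := PySem.Int.floordiv (L + max_seq_length - 1) max_seq_length
            (n, PySem.Int.floordiv (L + n - 1) n)
        (PySem.List.pyRange 0 ns.1 1).foldl
          (fun a2 i =>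
            (a2.1 ++ [PySem.List.slice p.1 (some (i * ns.2)) (some ((i + 1) * ns.2))],
             a2.2 ++ [PySem.List.slice p.2 (some (i * ns.2)) (some ((i + 1) * ns.2))])) acc)
    ([], [])

-- ===== PRECONDITION & SPEC =====
-- Pre_ excludes non-positive max_seq_length: there A raises ZeroDivisionError (bound 0)
-- or RecursionError (negative bound reaching an empty sequence), or returns accidental
-- empty output produced by a negative split count and an empty range.
def Pre_split_sequences (tokenized_en : List (List Int)) (tokenized_hi : List (List Int)) (max_seq_length : Int) : Prop := 1 ≤ max_seq_length
instance (tokenized_en : List (List Int)) (tokenized_hi : List (List Int)) (max_seq_length : Int) : Decidable (Pre_split_sequences tokenized_en tokenized_hi max_seq_length) := by unfold Pre_split_sequences; infer_instance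

def pvWitness_split_sequences : List (List Int) × List (List Int) × Int := ([[1, 2, 3]], [[1]], 2)

def Spec_split_sequences (tokenized_en : List (List Int)) (tokenized_hi : List (List Int)) (max_seq_length : Int) (out : List (List Int) × List (List Int)) : Prop := out = split_sequences_alt tokenized_en tokenized_hi max_seq_length
instance (tokenized_en : List (List Int)) (tokenized_hi : List (List Int)) (max_seq_length : Int) (out : List (List Int) × List (List Int)) : Decidable (Spec_split_sequences tokenized_en tokenized_hi max_seq_length out) := by unfold Spec_split_sequences; infer_instance

-- ===== CLAIM (what is proved, stated in full; the proofs are below) =====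
def Claim_equal_split_sequences : Prop := ∀ (tokenized_en : List (List Int)) (tokenized_hi : List (List Int)) (max_seq_length : Int), Dom_split_sequences tokenized_en tokenized_hi max_seq_length → Pre_split_sequences tokenized_en tokenized_hi max_seq_length → Spec_split_sequences tokenized_en tokenized_hi max_seq_length (split_sequences tokenized_en tokenized_hi max_seq_length)

-- ===== LEMMAS AND PROOFS =====

-- per-pair output of B (proof helper): the selection followed by the emitted segments
def pvChunk (en hi : List Int) (M : Int) : List (List Int) × List (List Int) :=
  if PySem.List.len en ≤ M ∧ PySem.List.len hi ≤ M then ([en], [hi])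
  else
    let L := max (PySem.List.len en) (PySem.List.len hi)
    let s := pvBBest L M 1 1
    let ns : Int × Int :=
      if 1 < s then (PySem.Int.floordiv L s, s)
      else
        let n := PySem.Int.floordiv (L + M - 1) M
        (n, PySem.Int.floordiv (L + n - 1) n)
    ((PySem.List.pyRange 0 ns.1 1).map (fun i => PySem.List.slice en (some (i * ns.2)) (some ((i + 1) * ns.2))),
     (PySem.List.pyRange 0 ns.1 1).map (fun i => PySem.List.slice hi (some (i * ns.2)) (some ((i + 1) * ns.2))))

lemma slice_min_len (xs : List Int) (a b : Int) (ha : 0 ≤ a) (hb : 0 ≤ b) :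
    PySem.List.slice xs (some a) (some (min b (PySem.List.len xs))) = PySem.List.slice xs (some a) (some b) := by
  have hlen0 : (0:Int) ≤ PySem.List.len xs := by simp [PySem.List.len_eq]
  rw [PySem.List.slice_toNat xs ha (le_min hb hlen0), PySem.List.slice_toNat xs ha hb]
  rw [List.take_eq_take_iff, List.length_drop]
  simp only [PySem.List.len_eq]
  omega

lemma slice_len_le (xs : List Int) (a b : Int) (ha : 0 ≤ a) (hb : 0 ≤ b) :
    PySem.List.len (PySem.List.slice xs (some a) (some b)) ≤ max (b - a) 0 := by
  rw [PySem.List.slice_toNat xs ha hb]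
  simp only [PySem.List.len_eq, List.length_take, List.length_drop]
  omega

lemma foldl_slices (xs ys : List Int) (s : Int) : ∀ (l : List Int) (a1 a2 : List (List Int)),
    l.foldl (fun acc i =>
        (acc.1 ++ [PySem.List.slice xs (some (i * s)) (some ((i + 1) * s))],
         acc.2 ++ [PySem.List.slice ys (some (i * s)) (some ((i + 1) * s))])) (a1, a2) =
      (a1 ++ l.map (fun i => PySem.List.slice xs (some (i * s)) (some ((i + 1) * s))),
       a2 ++ l.map (fun i => PySem.List.slice ys (some (i * s)) (some ((i + 1) * s)))) := by
  intro l
  induction l with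
  | nil => intro a1 a2; simp
  | cons i rest ih =>
    intro a1 a2
    rw [List.foldl_cons, ih]
    simp

-- first hit of find? on an ascending range is the least element satisfying the test
lemma find?_pyRange_some {p : Int → Bool} : ∀ (n : Nat) (a b m : Int), (b - a).toNat ≤ n →
    (PySem.List.pyRange a b 1).find? p = some m →
    a ≤ m ∧ m < b ∧ p m = true ∧ ∀ j, a ≤ j → j < m → p j = false := by
  intro n
  induction n with
  | zero =>
    intro a b m h hf
    rw [PySem.List.pyRange_one_eq_nil (by omega)] at hf
    simp at hf
  | succ n ih =>
    intro a b m h hf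
    by_cases hab : b ≤ a
    · rw [PySem.List.pyRange_one_eq_nil hab] at hf; simp at hf
    · rw [PySem.List.pyRange_one_cons (by omega)] at hf
      cases hp : p a with
      | true =>
        rw [List.find?_cons_of_pos hp] at hf
        obtain rfl : a = m := by simpa using hf
        exact ⟨le_refl _, by omega, hp, fun j h1 h2 => absurd h2 (by omega)⟩
      | false =>
        rw [List.find?_cons_of_neg (by simp [hp])] at hf
        obtain ⟨h1, h2, h3, h4⟩ := ih (a + 1) b m (by omega) hf
        refine ⟨by omega, h2, h3, fun j hj1 hj2 => ?_⟩
        rcases eq_or_lt_of_le hj1 with rfl | hlt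
        · exact hp
        · exact h4 j (by omega) hj2

-- the best-divisor loop: the result is the seed or a divisor of L in (seed, M], and it
-- dominates every candidate d, L/d the remaining iterations (e ≥ d) would inspect
lemma pvBBest_spec (L M : Int) : ∀ (n : Nat) (s d : Int), 1 ≤ d → (L + 1 - d).toNat ≤ n →
    (pvBBest L M s d = s ∨
      (s < pvBBest L M s d ∧ pvBBest L M s d ∣ L ∧ pvBBest L M s d ≤ M)) ∧
    (∀ e, d ≤ e → e * e ≤ L → e ∣ L →
      (e ≤ M → e ≤ pvBBest L M s d) ∧ (L / e ≤ M → L / e ≤ pvBBest L M s d)) := by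
  intro n
  induction n with
  | zero =>
    intro s d hd hn
    have hguard : ¬ (0 < d ∧ d * d ≤ L) := by
      rintro ⟨h1, h2⟩
      have : d ≤ d * d := le_mul_of_one_le_left (by omega) (by omega)
      omega
    rw [pvBBest, if_neg hguard]
    refine ⟨Or.inl rfl, fun e he1 he2 he3 => ?_⟩
    exact absurd (⟨by omega, by nlinarith⟩ : 0 < d ∧ d * d ≤ L) hguard
  | succ n ih =>
    intro s d hd hn
    by_cases hguard : 0 < d ∧ d * d ≤ L
    · set s1 := if PySem.Int.mod L d = 0 then
          (if (if s < d ∧ d ≤ M then d else s) < PySem.Int.floordiv L d ∧ PySem.Int.floordiv L d ≤ M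
            then PySem.Int.floordiv L d else (if s < d ∧ d ≤ M then d else s))
        else s with hs1def
      have hmain : pvBBest L M s d = pvBBest L M s1 (d + 1) := by
        rw [pvBBest, if_pos hguard]
      rw [hmain]
      have hdd : d ≤ d * d := le_mul_of_one_le_left (by omega) (by omega)
      obtain ⟨ih1, ih2⟩ := ih s1 (d + 1) (by omega) (by omega)
      -- facts about the one-step update s1
      have hstep : (s1 = s ∨ (s < s1 ∧ s1 ∣ L ∧ s1 ≤ M)) ∧
          (d ∣ L → (d ≤ M → d ≤ s1) ∧ (L / d ≤ M → L / d ≤ s1)) := by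
        rw [hs1def]
        by_cases hmod : PySem.Int.mod L d = 0
        · have hdvd : d ∣ L := (PySem.Int.mod_eq_zero_iff_dvd L d).1 hmod
          have hq : PySem.Int.floordiv L d = L / d := PySem.Int.floordiv_eq_ediv_of_pos hguard.1
          have hqdvd : L / d ∣ L := ⟨d, by rw [Int.ediv_mul_cancel hdvd]⟩
          rw [if_pos hmod]
          rw [hq]
          constructor
          · split_ifs with h1 h2 h3
            · exact Or.inr ⟨by omega, hqdvd, h2.2⟩
            · exact Or.inr ⟨h1.1, hdvd, h1.2⟩
            · exact Or.inr ⟨h3.1, hqdvd, h3.2⟩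
            · exact Or.inl rfl
          · intro _
            constructor <;> intro hle <;> split_ifs with h1 h2 h3 <;> omega
        · rw [if_neg hmod]
          refine ⟨Or.inl rfl, fun hdvd => absurd ((PySem.Int.mod_eq_zero_iff_dvd L d).2 hdvd) hmod⟩
      have hs_le_s1 : s ≤ s1 := by rcases hstep.1 with h | h; omega; omega
      have hs1_le_r : s1 ≤ pvBBest L M s1 (d + 1) := by rcases ih1 with h | h; omega; omega
      constructor
      · rcases ih1 with h | h
        · rw [h]; rcases hstep.1 with h2 | h2
          · exact Or.inl h2
          · exact Or.inr h2
        · refine Or.inr ⟨by omega, h.2.1, h.2.2⟩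
      · intro e he1 he2 he3
        rcases eq_or_lt_of_le he1 with rfl | hlt
        · obtain ⟨hA, hB⟩ := hstep.2 he3
          exact ⟨fun h => le_trans (hA h) hs1_le_r, fun h => le_trans (hB h) hs1_le_r⟩
        · exact ih2 e (by omega) he2 he3
    · rw [pvBBest, if_neg hguard]
      refine ⟨Or.inl rfl, fun e he1 he2 he3 => ?_⟩
      exact absurd (⟨by omega, by nlinarith⟩ : 0 < d ∧ d * d ≤ L) hguard

-- the loop from seed 1 dominates EVERY positive divisor of L that is ≤ M
lemma pvBBest_ge (L M : Int) (hL : 1 ≤ L) (c : Int) (hc : 0 < c) (hdvd : c ∣ L) (hcM : c ≤ M) :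
    c ≤ pvBBest L M 1 1 := by
  obtain ⟨_, h2⟩ := pvBBest_spec L M L.toNat 1 1 (le_refl _) (by omega)
  by_cases hcc : c * c ≤ L
  · exact (h2 c (by omega) hcc hdvd).1 hcM
  · obtain ⟨e, he⟩ := hdvd
    have he0 : 0 < e := by nlinarith
    have hec : e ≤ c := by nlinarith
    have heL : e * e ≤ L := by nlinarith
    have hLe : L / e = c := by rw [he, Int.mul_ediv_cancel _ (by omega)]
    exact hLe ▸ (h2 e (by omega) heL ⟨c, by rw [he]; ring⟩).2 (hLe ▸ hcM)

lemma quot_dvd (L c : Int) (hc : 0 < c) (hdvd : c ∣ L) : L / c ∣ L :=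
  ⟨c, by rw [Int.ediv_mul_cancel hdvd]⟩

lemma k_facts (L M : Int) (hM : 1 ≤ M) (hL : M < L) :
    1 ≤ PySem.Int.floordiv (L + M - 1) M ∧ PySem.Int.floordiv (L + M - 1) M ≤ L ∧
      L ≤ PySem.Int.floordiv (L + M - 1) M * M ∧
      PySem.Int.floordiv (L + M - 1) M * M ≤ L + M - 1 := by
  rw [show PySem.Int.floordiv (L + M - 1) M = (L + M - 1) / M from
    PySem.Int.floordiv_eq_ediv_of_pos (by omega)]
  have hid := Int.mul_ediv_add_emod (L + M - 1) M
  have hr0 := Int.emod_nonneg (L + M - 1) (by omega : M ≠ 0)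
  have hrM := Int.emod_lt_of_pos (L + M - 1) (by omega : 0 < M)
  set q := (L + M - 1) / M with hq
  set r := (L + M - 1) % M with hr
  refine ⟨?_, ?_, ?_, by nlinarith⟩
  · by_contra hc
    have h1 : M * q ≤ 0 :=
      mul_nonpos_of_nonneg_of_nonpos (by omega) (by omega)
    linarith
  · by_contra hc
    have h1 : M * (L + 1) ≤ M * q := mul_le_mul_of_nonneg_left (by omega) (by omega)
    have h2 : (M - 1) * L ≥ 0 := mul_nonneg (by omega) (by omega)
    nlinarith
  · nlinarith

-- a positive divisor of L not exceeding M has quotient at least k = ceil(L/M)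
lemma div_quot_ge_k (L M k c : Int) (hM : 1 ≤ M) (hL : 1 ≤ L) (hkM : k * M ≤ L + M - 1)
    (hc : 0 < c) (hdvd : c ∣ L) (hcM : c ≤ M) : k ≤ L / c := by
  obtain ⟨e, he⟩ := hdvd
  have he0 : 0 < e := by nlinarith
  rw [he, Int.mul_ediv_cancel_left _ (by omega)]
  by_contra hcon
  have h1 : e ≤ k - 1 := by omega
  have h2 : c * e ≤ M * (k - 1) := mul_le_mul hcM h1 (by omega) (by omega)
  nlinarith [he ▸ (le_refl L)]

-- a divisor of L at least k = ceil(L/M) has quotient at most M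
lemma div_quot_le_M (L M k n : Int) (hM : 1 ≤ M) (hL : 1 ≤ L) (hkM : L ≤ k * M)
    (hn : 0 < n) (hkn : k ≤ n) (hdvd : n ∣ L) : 1 ≤ L / n ∧ L / n ≤ M := by
  obtain ⟨c, hc⟩ := hdvd
  have hc0 : 0 < c := by nlinarith
  rw [hc, Int.mul_ediv_cancel_left _ (by omega)]
  refine ⟨by omega, ?_⟩
  by_contra hcon
  have h1 : n * (M + 1) ≤ n * c := mul_le_mul_of_nonneg_left (by omega) (by omega)
  have h2 : k * M ≤ n * M := mul_le_mul_of_nonneg_right hkn (by omega)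
  nlinarith [hc ▸ (le_refl L)]

lemma ceil_le (L k M : Int) (hk1 : 1 ≤ k) (hL1 : 1 ≤ L) (hM : 1 ≤ M) (hkM : L ≤ k * M) :
    1 ≤ PySem.Int.floordiv (L + k - 1) k ∧ PySem.Int.floordiv (L + k - 1) k ≤ M := by
  rw [show PySem.Int.floordiv (L + k - 1) k = (L + k - 1) / k from
    PySem.Int.floordiv_eq_ediv_of_pos (by omega)]
  have hid := Int.mul_ediv_add_emod (L + k - 1) k
  have hr0 := Int.emod_nonneg (L + k - 1) (by omega : k ≠ 0)
  have hrk := Int.emod_lt_of_pos (L + k - 1) (by omega : 0 < k)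
  set q := (L + k - 1) / k with hq
  set r := (L + k - 1) % k with hr
  constructor
  · by_contra hc
    have h1 : k * q ≤ 0 := mul_nonpos_of_nonneg_of_nonpos (by omega) (by omega)
    linarith
  · by_contra hc
    have h1 : k * (M + 1) ≤ k * q := mul_le_mul_of_nonneg_left (by omega) (by omega)
    nlinarith

lemma inner_eq (fuel : Nat) (en hi : List Int) (s M : Int) (hs : 1 ≤ s) (hsM : s ≤ M) :
    ∀ is : List Int, (∀ i ∈ is, 0 ≤ i) →
      pvAInner fuel en hi (PySem.List.len en) (PySem.List.len hi) s M is =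
        (is.map (fun i => PySem.List.slice en (some (i * s)) (some ((i + 1) * s))),
         is.map (fun i => PySem.List.slice hi (some (i * s)) (some ((i + 1) * s)))) := by
  intro is
  induction is with
  | nil => intro _; rw [pvAInner]; rfl
  | cons i rest ih =>
    intro hnn
    have hi0 : 0 ≤ i := hnn i (by simp)
    have hs0 : 0 ≤ s := by omega
    have ha0 : 0 ≤ i * s := mul_nonneg hi0 hs0
    have hb0 : 0 ≤ (i + 1) * s := mul_nonneg (by omega) hs0
    have hdiff : (i + 1) * s - i * s = s := by ring
    have hen := slice_min_len en (i * s) ((i + 1) * s) ha0 hb0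
    have hhi := slice_min_len hi (i * s) ((i + 1) * s) ha0 hb0
    have hlen_en := slice_len_le en (i * s) ((i + 1) * s) ha0 hb0
    have hlen_hi := slice_len_le hi (i * s) ((i + 1) * s) ha0 hb0
    rw [hdiff] at hlen_en hlen_hi
    rw [pvAInner.eq_def]
    simp only [hen, hhi]
    rw [if_neg (by simp only [PySem.List.len_eq] at *; omega)]
    rw [ih (fun j hj => hnn j (by simp [hj]))]
    simp

lemma pair_eq (fuel : Nat) (en hi : List Int) (M : Int) (hM : 1 ≤ M) :
    pvAPair fuel en hi M = pvChunk en hi M := by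
  rw [pvAPair.eq_def]
  unfold pvChunk
  by_cases hkeep : PySem.List.len en ≤ M ∧ PySem.List.len hi ≤ M
  · simp only [if_pos hkeep]
  · simp only [if_neg hkeep]
    set L := max (PySem.List.len en) (PySem.List.len hi) with hLdef
    have hML : M < L := by
      rcases not_and_or.1 hkeep with h | h
      · exact lt_of_lt_of_le (by simp [PySem.List.len_eq] at h ⊢; omega) (le_max_left _ _)
      · exact lt_of_lt_of_le (by simp [PySem.List.len_eq] at h ⊢; omega) (le_max_right _ _)
    set k := PySem.Int.floordiv (L + M - 1) M with hkdef
    obtain ⟨hk1, hkL, hkM, hkM2⟩ := k_facts L M hM hML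
    rw [← hkdef] at hk1 hkL hkM hkM2
    have hL1 : (1:Int) ≤ L := by omega
    set r := pvBBest L M 1 1 with hrdef
    obtain ⟨hr1, _⟩ := pvBBest_spec L M L.toNat 1 1 (le_refl _) (by omega)
    rw [← hrdef] at hr1
    -- r properties: r = 1 or r is a divisor of L in (1, M]
    by_cases hdvdk : PySem.Int.mod L k = 0
    · -- A's shortcut: k divides L
      have hkdvd : k ∣ L := (PySem.Int.mod_eq_zero_iff_dvd L k).1 hdvdk
      by_cases hkLeq : k = L
      · -- degenerate: only split size 1 fits (M = 1 in effect); both pick L chunks of size 1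
        have hr_eq : r = 1 := by
          rcases hr1 with h | h
          · exact h
          · exfalso
            have hq := div_quot_ge_k L M k r hM hL1 hkM2 (by omega) h.2.1 h.2.2
            obtain ⟨e, he⟩ := h.2.1
            have he0 : 0 < e := by nlinarith
            have hLr : L / r = e := by rw [he, Int.mul_ediv_cancel_left _ (by omega)]
            rw [hLr] at hq
            nlinarith [he ▸ (le_refl L)]
        have hq1 : PySem.Int.floordiv L k = 1 := by
          rw [PySem.Int.floordiv_eq_ediv_of_pos (by omega), hkLeq, Int.ediv_self (by omega)]
        have hceil : PySem.Int.floordiv (L + k - 1) k = 1 := by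
          rw [PySem.Int.floordiv_eq_ediv_of_pos (by omega), hkLeq]
          rw [show L + L - 1 = (L - 1) + 1 * L by ring, Int.add_mul_ediv_right _ _ (by omega)]
          rw [Int.ediv_eq_zero_of_lt (by omega) (by omega)]
          norm_num
        simp only [if_pos hdvdk, hr_eq, if_neg (by omega : ¬ (1:Int) < 1), ← hkdef, hq1, hceil]
        rw [inner_eq fuel en hi 1 M (by omega) hM _
          (fun j hmem => ((PySem.List.mem_pyRange_one).1 hmem).1)]
      · -- k < L: both pick n = k chunks of size L/k
        have hkltL : k < L := by omega
        set q := L / k with hqdef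
        have hq2 : 2 ≤ q := by
          obtain ⟨e, he⟩ := hkdvd
          have he0 : 0 < e := by nlinarith
          have : q = e := by rw [hqdef, he, Int.mul_ediv_cancel_left _ (by omega)]
          nlinarith [he ▸ (le_refl L)]
        obtain ⟨_, hqM⟩ := div_quot_le_M L M k k hM hL1 hkM (by omega) (le_refl _) hkdvd
        rw [← hqdef] at hqM
        have hq_le_r : q ≤ r := pvBBest_ge L M hL1 q (by omega) (quot_dvd L k (by omega) hkdvd) hqM
        have hr_eq : r = q := by
          rcases hr1 with h | h
          · omega
          · obtain ⟨hr_gt, hr_dvd, hr_M⟩ := h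
            have hLr_ge : k ≤ L / r := div_quot_ge_k L M k r hM hL1 hkM2 (by omega) hr_dvd hr_M
            -- r * k ≤ r * (L/r) = L = k * q  ⇒  r ≤ q
            have hrk : r * (L / r) = L := Int.mul_ediv_cancel' hr_dvd
            have hkq : k * q = L := Int.mul_ediv_cancel' hkdvd
            nlinarith [mul_le_mul_of_nonneg_left hLr_ge (by omega : (0:Int) ≤ r)]
        have hfq : PySem.Int.floordiv L k = q := PySem.Int.floordiv_eq_ediv_of_pos (by omega)
        have hfn : PySem.Int.floordiv L q = k := by
          rw [PySem.Int.floordiv_eq_ediv_of_pos (by omega), hqdef]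
          obtain ⟨e, he⟩ := hkdvd
          have he0 : 0 < e := by nlinarith
          rw [he, Int.mul_ediv_cancel_left _ (by omega), Int.mul_ediv_cancel _ (by omega)]
        simp only [if_pos hdvdk, ← hkdef, hfq, hfn, hr_eq, if_pos (by omega : (1:Int) < q)]
        rw [inner_eq fuel en hi q M (by omega) hqM _
          (fun j hmem => ((PySem.List.mem_pyRange_one).1 hmem).1)]
    · -- A scans range(k, L)
      cases hfind : (PySem.List.pyRange k L 1).find?
          (fun i => PySem.Int.mod L i == 0 && decide (PySem.Int.floordiv L i ≤ M)) with
      | some i =>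
        obtain ⟨hki, hiL, hpi, hfirst⟩ := find?_pyRange_some (L - k).toNat k L i (by omega) hfind
        simp only [Bool.and_eq_true, beq_iff_eq, decide_eq_true_eq] at hpi
        have hidvd : i ∣ L := (PySem.Int.mod_eq_zero_iff_dvd L i).1 hpi.1
        set q := L / i with hqdef
        have hfqi : PySem.Int.floordiv L i = q := PySem.Int.floordiv_eq_ediv_of_pos (by omega)
        have hqM : q ≤ M := by rw [← hfqi]; exact hpi.2
        have hq2 : 2 ≤ q := by
          obtain ⟨e, he⟩ := hidvd
          have he0 : 0 < e := by nlinarith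
          have : q = e := by rw [hqdef, he, Int.mul_ediv_cancel_left _ (by omega)]
          nlinarith [he ▸ (le_refl L)]
        have hq_le_r : q ≤ r := pvBBest_ge L M hL1 q (by omega) (quot_dvd L i (by omega) hidvd) hqM
        have hr_eq : r = q := by
          rcases hr1 with h | h
          · omega
          · obtain ⟨hr_gt, hr_dvd, hr_M⟩ := h
            set n0 := L / r with hn0def
            have hn0k : k ≤ n0 := div_quot_ge_k L M k r hM hL1 hkM2 (by omega) hr_dvd hr_M
            have hrn0 : r * n0 = L := Int.mul_ediv_cancel' hr_dvd
            have hn0L : n0 < L := by nlinarith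
            have hn0dvd : n0 ∣ L := ⟨r, by rw [← hrn0]; ring⟩
            have hLn0 : L / n0 = r := by
              rw [hn0def]
              obtain ⟨e, he⟩ := hr_dvd
              have he0 : 0 < e := by nlinarith
              rw [he, Int.mul_ediv_cancel_left _ (by omega), Int.mul_ediv_cancel _ (by omega)]
            -- the scan predicate holds at n0, so i ≤ n0 by minimality
            have hn0i : i ≤ n0 := by
              by_contra hcon
              have hp := hfirst n0 hn0k (by omega)
              rw [show PySem.Int.mod L n0 = 0 from (PySem.Int.mod_eq_zero_iff_dvd L n0).2 hn0dvd] at hp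
              rw [show PySem.Int.floordiv L n0 = L / n0 from
                PySem.Int.floordiv_eq_ediv_of_pos (by omega)] at hp
              rw [hLn0] at hp
              simp [hr_M] at hp
            -- r * i ≤ r * n0 = L = i * q ⇒ r ≤ q
            have hiq : i * q = L := Int.mul_ediv_cancel' hidvd
            nlinarith [mul_le_mul_of_nonneg_left hn0i (by omega : (0:Int) ≤ r)]
        have hfn : PySem.Int.floordiv L q = i := by
          rw [PySem.Int.floordiv_eq_ediv_of_pos (by omega), hqdef]
          obtain ⟨e, he⟩ := hidvd
          have he0 : 0 < e := by nlinarith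
          rw [he, Int.mul_ediv_cancel_left _ (by omega), Int.mul_ediv_cancel _ (by omega)]
        simp only [if_neg hdvdk, hfind, hfn, hfqi, hr_eq, if_pos (by omega : (1:Int) < q)]
        rw [inner_eq fuel en hi q M (by omega) hqM _
          (fun j hmem => ((PySem.List.mem_pyRange_one).1 hmem).1)]
      | none =>
        have hnone := List.find?_eq_none.1 hfind
        have hr_eq : r = 1 := by
          rcases hr1 with h | h
          · exact h
          · exfalso
            obtain ⟨hr_gt, hr_dvd, hr_M⟩ := h
            set n0 := L / r with hn0def
            have hn0k : k ≤ n0 := div_quot_ge_k L M k r hM hL1 hkM2 (by omega) hr_dvd hr_M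
            have hrn0 : r * n0 = L := Int.mul_ediv_cancel' hr_dvd
            have hn0L : n0 < L := by nlinarith
            have hn0dvd : n0 ∣ L := ⟨r, by rw [← hrn0]; ring⟩
            have hLn0 : L / n0 = r := by
              rw [hn0def]
              obtain ⟨e, he⟩ := hr_dvd
              have he0 : 0 < e := by nlinarith
              rw [he, Int.mul_ediv_cancel_left _ (by omega), Int.mul_ediv_cancel _ (by omega)]
            have hp := hnone n0 ((PySem.List.mem_pyRange_one).2 ⟨hn0k, hn0L⟩)
            rw [show PySem.Int.mod L n0 = 0 from (PySem.Int.mod_eq_zero_iff_dvd L n0).2 hn0dvd] at hp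
            rw [show PySem.Int.floordiv L n0 = L / n0 from
              PySem.Int.floordiv_eq_ediv_of_pos (by omega)] at hp
            rw [hLn0] at hp
            simp [hr_M] at hp
        obtain ⟨hs1, hsM⟩ := ceil_le L k M hk1 hL1 hM hkM
        simp only [if_neg hdvdk, hfind, hr_eq, if_neg (by omega : ¬ (1:Int) < 1), ← hkdef]
        rw [inner_eq fuel en hi _ M hs1 hsM _
          (fun j hmem => ((PySem.List.mem_pyRange_one).1 hmem).1)]

lemma asplit_eq (fuel : Nat) (M : Int) : ∀ pairs : List (List Int × List Int),
    pvASplit fuel pairs M =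
      (pairs.flatMap (fun p => (pvAPair fuel p.1 p.2 M).1),
       pairs.flatMap (fun p => (pvAPair fuel p.1 p.2 M).2)) := by
  intro pairs
  induction pairs with
  | nil => rw [pvASplit]; rfl
  | cons p rest ih => obtain ⟨en, hi⟩ := p; rw [pvASplit, ih]; simp

lemma alt_eq (ens his : List (List Int)) (M : Int) :
    split_sequences_alt ens his M =
      ((ens.zip his).flatMap (fun p => (pvChunk p.1 p.2 M).1),
       (ens.zip his).flatMap (fun p => (pvChunk p.1 p.2 M).2)) := by
  unfold split_sequences_alt
  have h : ∀ (l : List (List Int × List Int)) (acc : List (List Int) × List (List Int)),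
      l.foldl (fun acc p =>
      if PySem.List.len p.1 ≤ M ∧ PySem.List.len p.2 ≤ M then
        (acc.1 ++ [p.1], acc.2 ++ [p.2])
      else
        let L := max (PySem.List.len p.1) (PySem.List.len p.2)
        let s := pvBBest L M 1 1
        let ns : Int × Int :=
          if 1 < s then (PySem.Int.floordiv L s, s)
          else
            let n := PySem.Int.floordiv (L + M - 1) M
            (n, PySem.Int.floordiv (L + n - 1) n)
        (PySem.List.pyRange 0 ns.1 1).foldl
          (fun a2 i =>
            (a2.1 ++ [PySem.List.slice p.1 (some (i * ns.2)) (some ((i + 1) * ns.2))],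
             a2.2 ++ [PySem.List.slice p.2 (some (i * ns.2)) (some ((i + 1) * ns.2))])) acc) acc =
      (acc.1 ++ l.flatMap (fun p => (pvChunk p.1 p.2 M).1),
       acc.2 ++ l.flatMap (fun p => (pvChunk p.1 p.2 M).2)) := by
    intro l
    induction l with
    | nil => intro acc; simp
    | cons p rest ih =>
      intro acc
      rw [List.foldl_cons, ih]
      have hstep : ∀ acc2 : List (List Int) × List (List Int),
          (if PySem.List.len p.1 ≤ M ∧ PySem.List.len p.2 ≤ M then
            (acc2.1 ++ [p.1], acc2.2 ++ [p.2])
          else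
            let L := max (PySem.List.len p.1) (PySem.List.len p.2)
            let s := pvBBest L M 1 1
            let ns : Int × Int :=
              if 1 < s then (PySem.Int.floordiv L s, s)
              else
                let n := PySem.Int.floordiv (L + M - 1) M
                (n, PySem.Int.floordiv (L + n - 1) n)
            (PySem.List.pyRange 0 ns.1 1).foldl
              (fun a2 i =>
                (a2.1 ++ [PySem.List.slice p.1 (some (i * ns.2)) (some ((i + 1) * ns.2))],
                 a2.2 ++ [PySem.List.slice p.2 (some (i * ns.2)) (some ((i + 1) * ns.2))])) acc2) =
          (acc2.1 ++ (pvChunk p.1 p.2 M).1, acc2.2 ++ (pvChunk p.1 p.2 M).2) := by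
        intro acc2
        obtain ⟨a1, a2⟩ := acc2
        unfold pvChunk
        by_cases hkeep : PySem.List.len p.1 ≤ M ∧ PySem.List.len p.2 ≤ M
        · rw [if_pos hkeep, if_pos hkeep]
        · rw [if_neg hkeep, if_neg hkeep]
          simp only []
          rw [foldl_slices]
      rw [hstep]
      simp
  rw [h]
  simp

-- ===== VERDICT (by name: the statement is the Claim_ definition above) =====
theorem split_sequences_spec : Claim_equal_split_sequences := by
  intro ens his M _hdom hpre
  show _ = _
  rw [split_sequences, asplit_eq, alt_eq]
  have h : ∀ p ∈ ens.zip his, pvAPair (ens.length + (ens.map List.length).sum + 1) p.1 p.2 M = pvChunk p.1 p.2 M := by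
    intro p _
    exact pair_eq _ p.1 p.2 M hpre
  refine Prod.ext ?_ ?_ <;>
    · simp only []
      exact List.flatMap_congr (fun p hp => by rw [h p hp])
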